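-- pv_equiv track=rewrite | github.com/crabron/temp | sometestshitfortwosample.py | summall_od
-- ===== SOURCE A (Python) =====
-- from collections import OrderedDict
--
-- def summall_od(otu_list,iddict, sumotudict):
--     '''
--     Function create OrderedDict object.
--     key = sample Id
--     value = sum of all otu for this sample
--     '''
--     sumalldict = OrderedDict()
--     leng = len(otu_list)
--     lenglist = range(0, leng)
--     keyids = iddict.keys()
--     zipl = zip(keyids, lenglist)
--     for w in zipl:
--         a = w[1]
--         r = sumotudict.values()
--         y =[t[a] for t in r]
--         sum_y = sum(y)
--         sumalldict.update({w[0]:sum_y})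
--     return sumalldict
-- ===== SOURCE B (Python) =====
-- from collections import OrderedDict
--
-- def summall_od(otu_list, iddict, sumotudict):
--     '''One pass over the rows, accumulating every sample's column sum at once.'''
--     pairs = list(zip(iddict.keys(), range(len(otu_list))))
--     sums = OrderedDict((k, 0) for k, _ in pairs)
--     for t in sumotudict.values():
--         for k, a in pairs:
--             sums[k] = sums[k] + t[a]
--     return sums
-- ===== Notes on version B (the rewrite author's own statement) =====
-- stated objective: alternative
-- what changed: A computes each sample's total by re-scanning all rows once per column; B builds a zero-initialised OrderedDict over the (key, column) pairs and makes a single pass over the rows, accumulating every sample's column sum at once.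
import Mathlib
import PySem

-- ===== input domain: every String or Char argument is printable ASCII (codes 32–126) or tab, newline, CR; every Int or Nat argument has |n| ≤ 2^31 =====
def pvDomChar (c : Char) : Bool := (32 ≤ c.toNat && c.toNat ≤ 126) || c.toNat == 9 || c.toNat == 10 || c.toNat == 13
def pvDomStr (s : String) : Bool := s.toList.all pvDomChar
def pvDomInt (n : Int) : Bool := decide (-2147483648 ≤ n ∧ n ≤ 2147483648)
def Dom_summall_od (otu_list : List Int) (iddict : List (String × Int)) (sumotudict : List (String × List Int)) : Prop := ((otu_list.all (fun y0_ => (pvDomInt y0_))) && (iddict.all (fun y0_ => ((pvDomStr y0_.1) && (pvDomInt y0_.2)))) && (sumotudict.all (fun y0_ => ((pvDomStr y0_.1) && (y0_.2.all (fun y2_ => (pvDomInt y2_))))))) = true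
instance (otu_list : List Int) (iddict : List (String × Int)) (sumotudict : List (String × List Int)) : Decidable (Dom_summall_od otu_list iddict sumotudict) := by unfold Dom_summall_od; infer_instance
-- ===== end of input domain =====

-- B replaces A's per-sample rescans of all rows by a single pass over the rows that
-- accumulates every sample's column sum at once (objective: alternative decomposition).

-- ===== PORT A =====
def summall_od (otu_list : List Int) (iddict : List (String × Int)) (sumotudict : List (String × List Int)) : List (String × Int) :=
  let sumalldict : PySem.Dict String Int := PySem.Dict.empty
  let leng : Int := (otu_list.length : Int)
  let lenglist := PySem.List.pyRange 0 leng 1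
  let keyids := (PySem.Dict.ofList iddict).keys
  let zipl := keyids.zip lenglist
  (zipl.foldl (fun sumalldict w =>
    let a := w.2
    let r := (PySem.Dict.ofList sumotudict).values
    let y := r.map (fun t => PySem.List.pyGetD t a 0)   -- t[a]; Pre_ keeps it in range
    let sum_y := y.sum
    sumalldict.insert w.1 sum_y) sumalldict).items

-- ===== PORT B =====
def summall_od_alt (otu_list : List Int) (iddict : List (String × Int)) (sumotudict : List (String × List Int)) : List (String × Int) :=
  let pairs := ((PySem.Dict.ofList iddict).keys).zip (PySem.List.pyRange 0 (otu_list.length : Int) 1)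
  let sums : PySem.Dict String Int := pairs.foldl (fun d p => d.insert p.1 0) PySem.Dict.empty
  (((PySem.Dict.ofList sumotudict).values).foldl
    (fun d t => pairs.foldl (fun d p => d.modify p.1 0 (fun v => v + PySem.List.pyGetD t p.2 0)) d)
    sums).items

-- ===== PRECONDITION & SPEC =====
-- Pre_ excludes exactly the inputs on which the Python A raises IndexError: some row of
-- sumotudict is shorter than the number of column indices actually used.
def Pre_summall_od (otu_list : List Int) (iddict : List (String × Int)) (sumotudict : List (String × List Int)) : Prop :=
  ∀ t ∈ (PySem.Dict.ofList sumotudict).values,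
    min ((PySem.Dict.ofList iddict).keys.length) otu_list.length ≤ t.length
instance (otu_list : List Int) (iddict : List (String × Int)) (sumotudict : List (String × List Int)) : Decidable (Pre_summall_od otu_list iddict sumotudict) := by unfold Pre_summall_od; infer_instance

def pvWitness_summall_od : List Int × (List (String × Int)) × (List (String × List Int)) :=
  ([1, 2], [("a", 1), ("b", 2)], [("r1", [3, 4]), ("r2", [5, 6])])

def Spec_summall_od (otu_list : List Int) (iddict : List (String × Int)) (sumotudict : List (String × List Int)) (out : List (String × Int)) : Prop := out = summall_od_alt otu_list iddict sumotudict
instance (otu_list : List Int) (iddict : List (String × Int)) (sumotudict : List (String × List Int)) (out : List (String × Int)) : Decidable (Spec_summall_od otu_list iddict sumotudict out) := by unfold Spec_summall_od; infer_instance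

-- ===== CLAIM (what is proved, stated in full; the proofs are below) =====
def Claim_equal_summall_od : Prop := ∀ (otu_list : List Int) (iddict : List (String × Int)) (sumotudict : List (String × List Int)), Dom_summall_od otu_list iddict sumotudict → Pre_summall_od otu_list iddict sumotudict → Spec_summall_od otu_list iddict sumotudict (summall_od otu_list iddict sumotudict)

-- ===== LEMMAS AND PROOFS =====

-- the fst components of a zip with a nodup left list are nodup
theorem pv_nodup_fst_zip (l : List String) (r : List Int) (h : l.Nodup) :
    ((l.zip r).map Prod.fst).Nodup := by
  induction l generalizing r with
  | nil => simp
  | cons a l ih =>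
    cases r with
    | nil => simp
    | cons b r =>
      simp only [List.zip_cons_cons, List.map_cons, List.nodup_cons] at *
      refine ⟨fun hm => h.1 ?_, ih r h.2⟩
      simp only [List.mem_map] at hm
      obtain ⟨p, hp, rfl⟩ := hm
      exact (List.of_mem_zip hp).1

-- folding fresh-key inserts appends the corresponding items in order
theorem pv_foldl_insert_items (f : String × Int → Int) :
    ∀ (ps : List (String × Int)) (d : PySem.Dict String Int),
      (∀ p ∈ ps, d.contains p.1 = false) → ((ps.map Prod.fst).Nodup) →
      (ps.foldl (fun d p => d.insert p.1 (f p)) d).items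
        = d.items ++ ps.map (fun p => (p.1, f p)) := by
  intro ps
  induction ps with
  | nil => intro d _ _; simp
  | cons p ps ih =>
    intro d hc hnd
    have hcp : d.contains p.1 = false := hc p (List.mem_cons_self ..)
    have hins : (d.insert p.1 (f p)).items = d.items ++ [(p.1, f p)] := by
      simp [PySem.Dict.insert, hcp]
    have hc' : ∀ q ∈ ps, (d.insert p.1 (f p)).contains q.1 = false := by
      intro q hq
      have h1 : d.contains q.1 = false := hc q (List.mem_cons_of_mem _ hq)
      have h2 : p.1 ≠ q.1 := by
        intro he
        have : p.1 ∈ ps.map Prod.fst := he ▸ List.mem_map_of_mem hq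
        exact (List.nodup_cons.mp hnd).1 this
      simp only [PySem.Dict.contains, hins, List.any_append, List.any_cons, List.any_nil]
      simp only [PySem.Dict.contains] at h1
      simp [h1, h2]
    have hnd' : (ps.map Prod.fst).Nodup := (List.nodup_cons.mp hnd).2
    calc ((p :: ps).foldl (fun d p => d.insert p.1 (f p)) d).items
        = (ps.foldl (fun d p => d.insert p.1 (f p)) (d.insert p.1 (f p))).items := by
          simp [List.foldl_cons]
      _ = (d.items ++ [(p.1, f p)]) ++ ps.map (fun p => (p.1, f p)) := by
          rw [ih _ hc' hnd', hins]
      _ = d.items ++ (p :: ps).map (fun p => (p.1, f p)) := by simp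

-- folding in-place modifications over present, distinct keys updates the items pointwise
theorem pv_foldl_modify_items (h : String × Int → Int) :
    ∀ (ps pre : List (String × Int)) (g : String × Int → Int) (d : PySem.Dict String Int),
      d.items = pre ++ ps.map (fun p => (p.1, g p)) →
      (∀ q ∈ pre, ∀ p ∈ ps, q.1 ≠ p.1) →
      (ps.map Prod.fst).Nodup →
      (ps.foldl (fun d p => d.modify p.1 0 (fun v => v + h p)) d).items
        = pre ++ ps.map (fun p => (p.1, g p + h p)) := by
  intro ps
  induction ps with
  | nil => intro pre g d hi _ _; simpa using hi
  | cons p ps ih =>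
    intro pre g d hi hdisj hnd
    have hpre_ne : ∀ q ∈ pre, (q.1 == p.1) = false := by
      intro q hq
      simpa using hdisj q hq p (List.mem_cons_self ..)
    have hfind : d.items.find? (fun q => q.1 == p.1) = some (p.1, g p) := by
      rw [hi, List.find?_append]
      have : pre.find? (fun q => q.1 == p.1) = none :=
        List.find?_eq_none.mpr (fun q hq => by simp [hpre_ne q hq])
      simp [this]
    have hget : d.getD p.1 0 = g p := by
      simp [PySem.Dict.getD, PySem.Dict.get?, hfind]
    have hcont : d.contains p.1 = true := by
      simp only [PySem.Dict.contains, List.any_eq_true]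
      exact ⟨(p.1, g p), List.mem_of_find?_eq_some hfind, by simp⟩
    have hndt : (ps.map Prod.fst).Nodup := (List.nodup_cons.mp hnd).2
    have hpnotin : p.1 ∉ ps.map Prod.fst := (List.nodup_cons.mp hnd).1
    have hitems' : (d.modify p.1 0 (fun v => v + h p)).items
        = pre ++ (p.1, g p + h p) :: ps.map (fun q => (q.1, g q)) := by
      have hi' := hi
      rw [List.map_cons] at hi'
      simp only [PySem.Dict.modify, PySem.Dict.insert, hcont, if_pos, hget, hi']
      rw [List.map_append, List.map_cons]
      congr 1
      · refine (List.map_congr_left (fun q hq => ?_)).trans (List.map_id _)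
        simp [hpre_ne q hq]
      congr 1
      · simp
      · simp only [List.map_map]
        refine List.map_congr_left (fun q hq => ?_)
        have hne : q.1 ≠ p.1 := fun he => hpnotin (he ▸ List.mem_map_of_mem hq)
        simp [Function.comp, hne]
    have hdisj' : ∀ q ∈ pre ++ [(p.1, g p + h p)], ∀ r ∈ ps, q.1 ≠ r.1 := by
      intro q hq r hr
      rcases List.mem_append.mp hq with hq | hq
      · exact hdisj q hq r (List.mem_cons_of_mem _ hr)
      · simp only [List.mem_singleton] at hq
        subst hq
        exact fun he => hpnotin (he ▸ List.mem_map_of_mem hr)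
    calc ((p :: ps).foldl (fun d p => d.modify p.1 0 (fun v => v + h p)) d).items
        = (ps.foldl (fun d p => d.modify p.1 0 (fun v => v + h p))
            (d.modify p.1 0 (fun v => v + h p))).items := by simp [List.foldl_cons]
      _ = (pre ++ [(p.1, g p + h p)]) ++ ps.map (fun q => (q.1, g q + h q)) :=
          ih (pre ++ [(p.1, g p + h p)]) g _ (by simpa using hitems') hdisj' hndt
      _ = pre ++ (p :: ps).map (fun q => (q.1, g q + h q)) := by simp

-- one pass over the rows accumulates, per key, the column sum over those rows
theorem pv_foldl_rows_items (ps : List (String × Int)) (hnd : (ps.map Prod.fst).Nodup) :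
    ∀ (rows : List (List Int)) (g : String × Int → Int) (d : PySem.Dict String Int),
      d.items = ps.map (fun p => (p.1, g p)) →
      (rows.foldl (fun d t => ps.foldl
          (fun d p => d.modify p.1 0 (fun v => v + PySem.List.pyGetD t p.2 0)) d) d).items
        = ps.map (fun p => (p.1, g p + (rows.map (fun t => PySem.List.pyGetD t p.2 0)).sum)) := by
  intro rows
  induction rows with
  | nil => intro g d hi; simpa using hi
  | cons t rows ih =>
    intro g d hi
    have hstep := pv_foldl_modify_items (fun p => PySem.List.pyGetD t p.2 0) ps [] g d
      (by simpa using hi) (by simp) hnd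
    simp only [List.nil_append] at hstep
    have := ih (fun p => g p + PySem.List.pyGetD t p.2 0) _ hstep
    rw [List.foldl_cons, this]
    simp [add_assoc]

-- ===== VERDICT (by name: the statement is the Claim_ definition above) =====
theorem summall_od_spec : Claim_equal_summall_od := by
  unfold Claim_equal_summall_od
  intro otu_list iddict sumotudict _hdom _hpre
  have hnd : ((((PySem.Dict.ofList iddict).keys).zip
      (PySem.List.pyRange 0 (otu_list.length : Int) 1)).map Prod.fst).Nodup :=
    pv_nodup_fst_zip _ _ (PySem.Dict.nodup_keys_ofList iddict)
  have hempty : ∀ p ∈ (((PySem.Dict.ofList iddict).keys).zip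
      (PySem.List.pyRange 0 (otu_list.length : Int) 1)),
      (PySem.Dict.empty : PySem.Dict String Int).contains p.1 = false := by
    intro p _; simp [PySem.Dict.contains, PySem.Dict.empty]
  -- A's side: one insert per key with the full column sum
  have hA := pv_foldl_insert_items
    (fun p => (((PySem.Dict.ofList sumotudict).values).map
      (fun t => PySem.List.pyGetD t p.2 0)).sum) _ PySem.Dict.empty hempty hnd
  -- B's side: zero-initialised dict, then one pass over the rows
  have hB0 := pv_foldl_insert_items (fun _ => 0) _ PySem.Dict.empty hempty hnd
  have hB := pv_foldl_rows_items _ hnd ((PySem.Dict.ofList sumotudict).values) (fun _ => 0)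
    ((((PySem.Dict.ofList iddict).keys).zip
      (PySem.List.pyRange 0 (otu_list.length : Int) 1)).foldl
        (fun d p => d.insert p.1 0) PySem.Dict.empty) (by simpa [PySem.Dict.empty] using hB0)
  show (List.foldl (fun sumalldict w => sumalldict.insert w.1
          ((((PySem.Dict.ofList sumotudict).values).map
            (fun t => PySem.List.pyGetD t w.2 0)).sum))
        PySem.Dict.empty
        (((PySem.Dict.ofList iddict).keys).zip
          (PySem.List.pyRange 0 (otu_list.length : Int) 1))).items
      = (List.foldl (fun d t => List.foldl
            (fun d p => d.modify p.1 0 (fun v => v + PySem.List.pyGetD t p.2 0)) d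
            (((PySem.Dict.ofList iddict).keys).zip
              (PySem.List.pyRange 0 (otu_list.length : Int) 1)))
          (List.foldl (fun d p => d.insert p.1 0) PySem.Dict.empty
            (((PySem.Dict.ofList iddict).keys).zip
              (PySem.List.pyRange 0 (otu_list.length : Int) 1)))
          ((PySem.Dict.ofList sumotudict).values)).items
  rw [hA, hB]
  simp [PySem.Dict.empty]
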